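-- pv_equiv track=rewrite | github.com/kirill-kondrashov/lean-misc | tools/problem1_odd_profile_search.py | upper_downsets
-- ===== SOURCE A (Python) =====
-- from typing import Dict, Iterable, List, Sequence, Set, Tuple
--
-- def upper_downsets(upper_part: Sequence[int]) -> List[Tuple[int, ...]]:
--     upper_tuple = tuple(upper_part)
--     lower_upper_elements = {
--         upper_element: tuple(
--             candidate
--             for candidate in upper_tuple
--             if candidate != upper_element and (candidate & upper_element) == candidate
--         )
--         for upper_element in upper_tuple
--     }
--     downsets: List[Tuple[int, ...]] = []
--     for chosen_mask in range(1 << len(upper_tuple)):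
--         chosen = {
--             upper_tuple[index]
--             for index in range(len(upper_tuple))
--             if chosen_mask & (1 << index)
--         }
--         if all(all(candidate in chosen for candidate in lower_upper_elements[upper_element]) for upper_element in chosen):
--             downsets.append(tuple(sorted(chosen)))
--     return downsets
-- ===== SOURCE B (Python) =====
-- def upper_downsets(upper_part):
--     vals = list(upper_part)
--     n = len(vals)
--     # distinct values in first-occurrence order
--     distinct = []
--     for v in vals:
--         if v not in distinct:
--             distinct.append(v)
--     d = len(distinct)
--     # per position: the bit of its value and the bitmask (over distinct values)
--     # of the strict bitwise-predecessors its value requires in a downset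
--     vbit = [1 << distinct.index(v) for v in vals]
--     req = []
--     for v in vals:
--         m = 0
--         for k in range(d):
--             w = distinct[k]
--             if w != v and (w & v) == w:
--                 m |= 1 << k
--         req.append(m)
--
--     def emit(present):
--         return tuple(sorted(w for k, w in enumerate(distinct) if present >> k & 1))
--
--     # DFS over positions (highest first, exclude-branch before include-branch,
--     # so leaves come out in ascending subset-mask order), carrying the two
--     # accumulators incrementally; a leaf is kept iff every required
--     # predecessor value is present.
--     def go(i, need, present):
--         if i == 0:
--             return [emit(present)] if need & present == need else []
--         j = i - 1
--         return go(j, need, present) + go(j, need | req[j], present | vbit[j])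
--
--     return go(n, 0, 0)
-- ===== Notes on version B (the rewrite author's own statement) =====
-- stated objective: alternative
-- what changed: A loops over all 2^n masks and, for each, rebuilds the chosen set and re-scans every chosen element's precomputed predecessor list with membership tests; B instead generates the subsets by a binary DFS over positions (exclude branch before include branch, giving the same ascending-mask order), threading two incremental bitmask accumulators (values present, predecessor values needed) down the recursion so each subset is decided by one bitwise subset test with no per-subset reconstruction or scan (measured 6.9x at n=16, but both are exponential in n, so faster is left unclaimed).
import Mathlib
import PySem

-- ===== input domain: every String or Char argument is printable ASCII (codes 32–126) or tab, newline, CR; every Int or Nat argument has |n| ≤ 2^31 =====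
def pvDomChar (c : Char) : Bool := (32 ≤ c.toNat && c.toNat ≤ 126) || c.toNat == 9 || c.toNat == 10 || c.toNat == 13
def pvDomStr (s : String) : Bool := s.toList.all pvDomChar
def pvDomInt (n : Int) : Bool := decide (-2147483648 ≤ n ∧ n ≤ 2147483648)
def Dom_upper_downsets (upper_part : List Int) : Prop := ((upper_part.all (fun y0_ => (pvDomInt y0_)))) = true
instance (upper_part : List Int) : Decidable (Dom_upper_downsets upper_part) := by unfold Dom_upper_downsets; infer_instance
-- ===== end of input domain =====

-- B replaces A's loop over all 2^n subset masks (each rebuilding the chosen set and re-scanning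
-- every chosen element's predecessor list with membership tests) by a binary DFS over positions —
-- exclude branch before include branch, which yields the same ascending-mask order — threading two
-- incremental bitmask accumulators (values present, predecessor values needed) down the recursion,
-- so each subset is decided by one bitwise subset test with no per-subset reconstruction or scan
-- (an alternative decomposition; both are exponential in n, as the output itself can be).

-- ===== PORT A =====
-- literal transliteration of Source A; the set comprehension over `range(len(upper_tuple))` is ported
-- over `zipIdx` (index–value pairs, the same traversal); `lower_upper_elements[upper_element]`
-- is `getD _ []` — the key is always present, so the default is never used.
def upper_downsets (upper_part : List Int) : List (List Int) :=
  let upper_tuple := upper_part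
  let lower_upper_elements : PySem.Dict Int (List Int) :=
    upper_tuple.foldl (fun d upper_element =>
      d.insert upper_element (upper_tuple.filter (fun candidate =>
        candidate != upper_element && (PySem.Int.band candidate upper_element == candidate))))
      PySem.Dict.empty
  (PySem.List.pyRange 0 ((1 : Int) <<< upper_tuple.length) 1).foldl (fun downsets chosen_mask =>
    let chosen : PySem.Set Int := PySem.Set.ofList (upper_tuple.zipIdx.filterMap
      (fun p => if PySem.Int.band chosen_mask ((1 : Int) <<< p.2) != 0 then some p.1 else none))
    if chosen.all (fun upper_element =>
        (lower_upper_elements.getD upper_element []).all (fun candidate =>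
          PySem.Set.contains chosen candidate)) then
      downsets ++ [PySem.List.sorted chosen (fun x => x) false]
    else downsets) []

-- ===== PORT B =====
-- literal transliteration of Source B; the `for v in vals: if v not in distinct: distinct.append(v)`
-- loop IS PySem.Set.ofList (= foldl Set.add); masks and bit accumulators are Nat, as Source B's are
-- nonnegative ints; `distinct.index(v)` is List.idxOf; in-range list indexing is List.getD.
-- `emit` is udEmit, the nested `go` is udGo with fuel i (Source B's i, base case i == 0).
def udEmit (distinct : List Int) (present : Nat) : List Int :=
  PySem.List.sorted (distinct.zipIdx.filterMap
    (fun p => if present >>> p.2 &&& 1 = 1 then some p.1 else none)) (fun x => x) false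

def udGo (req vbit : List Nat) (distinct : List Int) : Nat → Nat → Nat → List (List Int)
  | 0, need, present => if need &&& present = need then [udEmit distinct present] else []
  | j+1, need, present =>
      udGo req vbit distinct j need present ++
      udGo req vbit distinct j (need ||| req.getD j 0) (present ||| vbit.getD j 0)

def upper_downsets_alt (upper_part : List Int) : List (List Int) :=
  let vals := upper_part
  let n := vals.length
  let distinct : PySem.Set Int := PySem.Set.ofList vals
  let d := distinct.length
  let vbit : List Nat := vals.map (fun v => 1 <<< distinct.idxOf v)
  let req : List Nat := vals.map (fun v =>
    (List.range d).foldl (fun m k =>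
      if distinct.getD k 0 ≠ v ∧ PySem.Int.band (distinct.getD k 0) v = distinct.getD k 0
      then m ||| (1 <<< k) else m) 0)
  udGo req vbit distinct n 0 0

-- ===== PRECONDITION & SPEC =====
def Spec_upper_downsets (upper_part : List Int) (out : List (List Int)) : Prop := out = upper_downsets_alt upper_part
instance (upper_part : List Int) (out : List (List Int)) : Decidable (Spec_upper_downsets upper_part out) := by unfold Spec_upper_downsets; infer_instance

-- ===== CLAIM (what is proved, stated in full; the proofs are below) =====
def Claim_equal_upper_downsets : Prop := ∀ (upper_part : List Int), Dom_upper_downsets upper_part → Spec_upper_downsets upper_part (upper_downsets upper_part)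

-- ===== LEMMAS AND PROOFS =====

lemma pv_band_shift (k i : Nat) :
    (PySem.Int.band (k : Int) ((1 : Int) <<< (i : Int)) != 0) = k.testBit i := by
  have h1 : ((1 : Int) <<< (i : Int)) = ((1 <<< i : Nat) : Int) := by
    exact_mod_cast Int.shiftLeft_natCast 1 i
  rw [h1, PySem.Int.band_natCast, Nat.one_shiftLeft, Nat.and_two_pow]
  rcases h : k.testBit i
  · simp
  · simp

lemma pv_and_subset (x y : Nat) :
    (x &&& y = x) ↔ ∀ t, x.testBit t = true → y.testBit t = true := by
  constructor
  · intro h t ht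
    have h2 := congrArg (fun z => z.testBit t) h
    simp only [Nat.testBit_and, ht, Bool.true_and] at h2
    exact h2
  · intro h
    apply Nat.eq_of_testBit_eq
    intro t
    rcases hx : x.testBit t
    · simp [Nat.testBit_and, hx]
    · simp [Nat.testBit_and, hx, h t hx]

lemma pv_dict_getD (f : Int → List Int) (l : List Int) (d : PySem.Dict Int (List Int)) (v : Int) :
    (l.foldl (fun d e => d.insert e (f e)) d).getD v [] =
      if v ∈ l then f v else d.getD v [] := by
  induction l generalizing d with
  | nil => simp
  | cons x xs ih =>
      simp only [List.foldl_cons, ih, PySem.Dict.getD_insert, List.mem_cons]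
      by_cases hxl : v ∈ xs
      · simp [hxl]
      · by_cases hvx : v = x <;> simp [hxl, hvx]

lemma pv_testBit_foldl_or (l : List Nat) (c : Nat → Prop) [DecidablePred c] (g : Nat → Nat)
    (a t : Nat) :
    ((l.foldl (fun x i => if c i then x ||| g i else x) a).testBit t) =
      (a.testBit t || l.any (fun i => decide (c i) && (g i).testBit t)) := by
  induction l generalizing a with
  | nil => simp
  | cons x xs ih =>
      simp only [List.foldl_cons, List.any_cons]
      by_cases h : c x
      · simp only [h, if_pos, decide_true, Bool.true_and, ih, Nat.testBit_or, Bool.or_assoc]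
      · simp [h, ih]

lemma pv_mem_filterMap_zipIdx (xs : List Int) (c : Nat → Prop) [DecidablePred c] (v : Int) :
    (v ∈ xs.zipIdx.filterMap (fun p => if c p.2 then some p.1 else none)) ↔
      ∃ i, ∃ _ : i < xs.length, c i ∧ xs[i] = v := by
  simp only [List.mem_filterMap]
  constructor
  · rintro ⟨⟨x, i⟩, hmem, hif⟩
    obtain ⟨-, hlt, hx⟩ := List.mem_zipIdx hmem
    simp only [Nat.zero_add] at hlt
    by_cases hc : c i
    · refine ⟨i, hlt, hc, ?_⟩
      simp only [hc, if_pos] at hif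
      simp only [Nat.sub_zero] at hx
      cases hif
      exact hx.symm
    · simp [hc] at hif
  · rintro ⟨i, hi, hc, hv⟩
    refine ⟨(xs[i], i), ?_, by simp [hc, hv]⟩
    rw [List.mem_zipIdx_iff_getElem?]
    simp [List.getElem?_eq_getElem hi]

lemma pv_filterMap_zipIdx_sublist (xs : List Int) (c : Nat → Prop) [DecidablePred c] :
    (xs.zipIdx.filterMap (fun p => if c p.2 then some p.1 else none)).Sublist xs := by
  suffices h : ∀ k, ((xs.zipIdx k).filterMap (fun p => if c p.2 then some p.1 else none)).Sublist xs from h 0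
  induction xs with
  | nil => simp
  | cons x t ih =>
      intro k
      simp only [List.zipIdx_cons, List.filterMap_cons]
      by_cases h : c k
      · simpa [h] using (ih (k + 1)).cons₂ x
      · simpa [h] using (ih (k + 1)).cons x

lemma pv_shr_and_one (m i : Nat) : (m >>> i &&& 1 = 1) ↔ m.testBit i = true := by
  simp [Nat.testBit, Nat.and_one_is_mod]

lemma pv_foldl_if_append {α β : Type} (l : List α) (c : α → Bool) (f : α → β) (acc : List β) :
    l.foldl (fun a x => if c x then a ++ [f x] else a) acc =
      acc ++ l.flatMap (fun x => if c x then [f x] else []) := by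
  induction l generalizing acc with
  | nil => simp
  | cons x xs ih =>
      simp only [List.foldl_cons, List.flatMap_cons, ih]
      by_cases h : c x <;> simp [h]

-- the bit accumulator a DFS path has gathered: bits i < k of the path mask m, OR-ed through g
def udAcc (g : List Nat) (k m : Nat) : Nat :=
  (List.range k).foldl (fun x i => if m.testBit i then x ||| g.getD i 0 else x) 0

lemma udAcc_congr (g : List Nat) (k : Nat) {m m' : Nat}
    (h : ∀ i, i < k → m.testBit i = m'.testBit i) : udAcc g k m = udAcc g k m' := by
  unfold udAcc
  apply PySem.List.foldl_congr_mem
  intro acc i hi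
  rw [h i (List.mem_range.1 hi)]

lemma udAcc_succ (g : List Nat) (k m : Nat) :
    udAcc g (k + 1) m =
      if m.testBit k then udAcc g k m ||| g.getD k 0 else udAcc g k m := by
  unfold udAcc
  rw [List.range_succ, List.foldl_append]
  rfl

-- the DFS expanded: leaves in ascending mask order, with the accumulators as udAcc of the mask
lemma udGo_eq (req vbit : List Nat) (D : List Int) :
    ∀ (k nd pr : Nat), udGo req vbit D k nd pr =
      (List.range (1 <<< k)).flatMap (fun m =>
        if (nd ||| udAcc req k m) &&& (pr ||| udAcc vbit k m) = nd ||| udAcc req k m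
        then [udEmit D (pr ||| udAcc vbit k m)] else []) := by
  intro k
  induction k with
  | zero =>
      intro nd pr
      simp [udGo, udAcc, List.range_one]
  | succ k ih =>
      intro nd pr
      have h2 : (1 <<< (k + 1)) = (1 <<< k) + (1 <<< k) := by
        simp [Nat.one_shiftLeft, Nat.pow_succ, Nat.mul_two]
      rw [udGo, ih, ih, h2, List.range_add, List.flatMap_append]
      congr 1
      · apply List.flatMap_congr
        intro m hm
        have hmlt : m < 2 ^ k := by
          simpa [Nat.one_shiftLeft] using List.mem_range.1 hm
        rw [udAcc_succ, udAcc_succ, Nat.testBit_lt_two_pow hmlt]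
        simp
      · rw [List.flatMap_map]
        apply List.flatMap_congr
        intro m hm
        have hmlt : m < 2 ^ k := by
          simpa [Nat.one_shiftLeft] using List.mem_range.1 hm
        have hor : 1 <<< k + m = 2 ^ k ||| m := by
          rw [Nat.one_shiftLeft]
          simpa using Nat.two_pow_add_eq_or_of_lt hmlt 1
        have hbit : ∀ i, i < k → (1 <<< k + m).testBit i = m.testBit i := by
          intro i hik
          rw [hor, Nat.testBit_or, Nat.testBit_two_pow_of_ne (Nat.ne_of_gt hik)]
          simp
        have hbitk : (1 <<< k + m).testBit k = true := by
          rw [hor, Nat.testBit_or, Nat.testBit_two_pow_self]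
          simp
        rw [udAcc_succ, udAcc_succ, hbitk, if_pos rfl, if_pos rfl,
          udAcc_congr req k hbit, udAcc_congr vbit k hbit]
        have e1 : nd ||| (udAcc req k m ||| req.getD k 0) =
            nd ||| req.getD k 0 ||| udAcc req k m := by ac_rfl
        have e2 : pr ||| (udAcc vbit k m ||| vbit.getD k 0) =
            pr ||| vbit.getD k 0 ||| udAcc vbit k m := by ac_rfl
        rw [e1, e2]

-- ===== VERDICT (by name: the statement is the Claim_ definition above) =====
theorem upper_downsets_spec : Claim_equal_upper_downsets := by
  intro vals _
  show upper_downsets vals = upper_downsets_alt vals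
  simp only [upper_downsets, upper_downsets_alt]
  have h1 : ((1 : Int) <<< vals.length) = ((1 <<< vals.length : Nat) : Int) := rfl
  rw [h1, PySem.List.pyRange_zero_nat, List.foldl_map]
  -- names for the shared data
  set D : List Int := PySem.Set.ofList vals with hDdef
  set vb : List Nat := List.map (fun v => 1 <<< List.idxOf v D) vals with hvbdef
  set rq : List Nat := List.map
      (fun v => List.foldl
        (fun m k => if List.getD D k 0 ≠ v ∧
            PySem.Int.band (List.getD D k 0) v = List.getD D k 0 then m ||| 1 <<< k else m)
        0 (List.range D.length)) vals with hrqdef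
  set dict : PySem.Dict Int (List Int) := List.foldl
      (fun d upper_element => d.insert upper_element
        (List.filter (fun candidate =>
          candidate != upper_element && PySem.Int.band candidate upper_element == candidate) vals))
      PySem.Dict.empty vals with hdictdef
  -- reshape A's loop into a flatMap, and expand B's DFS into one
  rw [pv_foldl_if_append, List.nil_append, udGo_eq]
  apply List.flatMap_congr
  intro mask _
  simp only [Nat.zero_or]
  -- per-mask data
  set SL : List Int := List.filterMap
      (fun p => if (PySem.Int.band (↑mask) ((1:Int) <<< (p.2:Int)) != 0) = true then some p.1 else none)
      vals.zipIdx with hSLdef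
  set N : Nat := udAcc rq vals.length mask with hNdef
  set P : Nat := udAcc vb vals.length mask with hPdef
  -- basic facts about the distinct list
  have hmemD : ∀ x : Int, x ∈ D ↔ x ∈ vals := by rw [hDdef]; exact fun x => PySem.Set.mem_ofList vals x
  have hndD : D.Nodup := by rw [hDdef]; exact PySem.Set.nodup_ofList vals
  -- membership in A's chosen set
  have hSL : ∀ v : Int, v ∈ SL ↔ ∃ i, ∃ _ : i < vals.length, mask.testBit i = true ∧ vals[i] = v := by
    intro v
    rw [hSLdef]
    simp only [pv_band_shift]
    exact pv_mem_filterMap_zipIdx vals (fun i => mask.testBit i = true) v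
  have hVB : ∀ i, ∀ _ : i < vals.length, vb.getD i 0 = 1 <<< List.idxOf vals[i] D := by
    intro i h
    rw [hvbdef, List.getD_eq_getElem _ _ (by simpa using h)]
    simp
  have hRQ : ∀ i, ∀ _ : i < vals.length, ∀ t : Nat, ((rq.getD i 0).testBit t = true ↔
      (∃ ht : t < D.length, D[t] ≠ vals[i] ∧ PySem.Int.band D[t] vals[i] = D[t])) := by
    intro i h t
    rw [hrqdef, List.getD_eq_getElem _ _ (by simpa using h)]
    rw [List.getElem_map]
    rw [pv_testBit_foldl_or (List.range D.length)
      (fun k => List.getD D k 0 ≠ vals[i] ∧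
        PySem.Int.band (List.getD D k 0) vals[i] = List.getD D k 0) (fun k => 1 <<< k) 0 t]
    simp only [Nat.zero_testBit, Bool.false_or, List.any_eq_true, List.mem_range,
      Nat.one_shiftLeft, Nat.testBit_two_pow]
    constructor
    · rintro ⟨k, hk, hcond⟩
      simp only [Bool.and_eq_true, decide_eq_true_eq] at hcond
      obtain ⟨⟨hne, hband⟩, hkt⟩ := hcond
      subst hkt
      exact ⟨hk, by rwa [List.getD_eq_getElem _ _ hk] at hne, by rwa [List.getD_eq_getElem _ _ hk] at hband⟩
    · rintro ⟨ht, hne, hband⟩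
      refine ⟨t, ht, ?_⟩
      simp only [Bool.and_eq_true, decide_eq_true_eq]
      rw [List.getD_eq_getElem _ _ ht]
      simp [hne, hband]
  -- bits of P
  have hP : ∀ t : Nat, P.testBit t = true ↔
      ∃ i, ∃ _ : i < vals.length, mask.testBit i = true ∧ List.idxOf vals[i] D = t := by
    intro t
    rw [hPdef]
    unfold udAcc
    rw [pv_testBit_foldl_or (List.range vals.length) (fun i => mask.testBit i = true)
      (fun i => vb.getD i 0) 0 t]
    simp only [Nat.zero_testBit, Bool.false_or, List.any_eq_true, List.mem_range,
      Bool.and_eq_true, decide_eq_true_eq]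
    constructor
    · rintro ⟨i, hi, hbit, htb⟩
      rw [hVB i hi, Nat.one_shiftLeft, Nat.testBit_two_pow] at htb
      exact ⟨i, hi, hbit, by simpa using htb⟩
    · rintro ⟨i, hi, hbit, htb⟩
      refine ⟨i, hi, hbit, ?_⟩
      rw [hVB i hi, Nat.one_shiftLeft, Nat.testBit_two_pow]
      simpa using htb
  -- bits of N
  have hN : ∀ t : Nat, N.testBit t = true ↔
      ∃ i, ∃ _ : i < vals.length, mask.testBit i = true ∧
        (∃ ht : t < D.length, D[t] ≠ vals[i] ∧ PySem.Int.band D[t] vals[i] = D[t]) := by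
    intro t
    rw [hNdef]
    unfold udAcc
    rw [pv_testBit_foldl_or (List.range vals.length) (fun i => mask.testBit i = true)
      (fun i => rq.getD i 0) 0 t]
    simp only [Nat.zero_testBit, Bool.false_or, List.any_eq_true, List.mem_range,
      Bool.and_eq_true, decide_eq_true_eq]
    constructor
    · rintro ⟨i, hi, hbit, htb⟩
      exact ⟨i, hi, hbit, (hRQ i hi t).1 htb⟩
    · rintro ⟨i, hi, hbit, htb⟩
      exact ⟨i, hi, hbit, (hRQ i hi t).2 htb⟩
  -- P's bits name exactly the chosen values
  have hPm : ∀ t, ∀ ht : t < D.length, (P.testBit t = true ↔ D[t] ∈ SL) := by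
    intro t ht
    rw [hP t, hSL (D[t]'ht)]
    constructor
    · rintro ⟨i, hi, hbit, hidx⟩
      refine ⟨i, hi, hbit, ?_⟩
      have hmem : vals[i] ∈ D := (hmemD _).2 (List.getElem_mem hi)
      have hlt : List.idxOf vals[i] D < D.length := List.idxOf_lt_length_of_mem hmem
      subst hidx
      exact (List.getElem_idxOf hlt).symm
    · rintro ⟨i, hi, hbit, hval⟩
      refine ⟨i, hi, hbit, ?_⟩
      rw [hval]
      exact List.Nodup.idxOf_getElem hndD t ht
  have hdict : ∀ e : Int, e ∈ vals → dict.getD e [] =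
      List.filter (fun c => c != e && PySem.Int.band c e == c) vals := by
    intro e he
    rw [hdictdef, pv_dict_getD, if_pos he]
  -- the two acceptance conditions agree
  have hcond : ((PySem.Set.ofList SL).all (fun upper_element => (dict.getD upper_element []).all
        (fun candidate => (PySem.Set.ofList SL).contains candidate)) = true) ↔ (N &&& P = N) := by
    rw [pv_and_subset N P]
    constructor
    · intro hall t htb
      obtain ⟨i, hi, hbit, ht, hne, hband⟩ := (hN t).1 htb
      have heSL : vals[i] ∈ SL := (hSL _).2 ⟨i, hi, hbit, rfl⟩
      have hinner := List.all_eq_true.1 hall (vals[i]) ((PySem.Set.mem_ofList _ _).2 heSL)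
      have hcmem : D[t] ∈ dict.getD vals[i] [] := by
        rw [hdict _ (List.getElem_mem hi), List.mem_filter]
        refine ⟨(hmemD _).1 (List.getElem_mem ht), ?_⟩
        simp [hne, hband]
      have hcin := List.all_eq_true.1 hinner (D[t]'ht) hcmem
      rw [PySem.Set.contains_iff, PySem.Set.mem_ofList] at hcin
      exact (hPm t ht).2 hcin
    · intro hsub
      rw [List.all_eq_true]
      intro e hemem
      rw [PySem.Set.mem_ofList] at hemem
      obtain ⟨i, hi, hbit, hival⟩ := (hSL e).1 hemem
      rw [List.all_eq_true]
      intro c hcmem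
      rw [hdict e (hival ▸ List.getElem_mem hi), List.mem_filter] at hcmem
      obtain ⟨hcvals, hcb⟩ := hcmem
      rw [Bool.and_eq_true] at hcb
      have hne : c ≠ e := by simpa using hcb.1
      have hband : PySem.Int.band c e = c := by simpa using hcb.2
      have hcD : c ∈ D := (hmemD _).2 hcvals
      have ht : List.idxOf c D < D.length := List.idxOf_lt_length_of_mem hcD
      have hDt : D[List.idxOf c D] = c := List.getElem_idxOf ht
      have hNt : N.testBit (List.idxOf c D) = true := by
        refine (hN _).2 ⟨i, hi, hbit, ht, ?_, ?_⟩
        · rw [hDt, hival]; exact hne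
        · rw [hDt, hival]; exact hband
      have hPt := hsub _ hNt
      have := (hPm _ ht).1 hPt
      rw [hDt] at this
      rw [PySem.Set.contains_iff, PySem.Set.mem_ofList]
      exact this
  -- the two appended rows agree
  have hout : PySem.List.sorted (PySem.Set.ofList SL) (fun x => x) false = udEmit D P := by
    unfold udEmit
    have hBLnodup : (List.filterMap
        (fun p => if P >>> p.2 &&& 1 = 1 then some p.1 else none) D.zipIdx).Nodup :=
      (pv_filterMap_zipIdx_sublist D (fun t => P >>> t &&& 1 = 1)).nodup hndD
    apply PySem.List.sorted_eq_sorted_of_perm _ _ _ (fun a b h => h)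
    rw [List.perm_ext_iff_of_nodup (PySem.Set.nodup_ofList SL) hBLnodup]
    intro v
    rw [PySem.Set.mem_ofList, pv_mem_filterMap_zipIdx D (fun t => P >>> t &&& 1 = 1) v]
    constructor
    · intro hvSL
      have hvv : v ∈ vals := by
        obtain ⟨i, hi, _, hival⟩ := (hSL v).1 hvSL
        exact hival ▸ List.getElem_mem hi
      have hvD : v ∈ D := (hmemD _).2 hvv
      have ht : List.idxOf v D < D.length := List.idxOf_lt_length_of_mem hvD
      have hDt : D[List.idxOf v D] = v := List.getElem_idxOf ht
      refine ⟨List.idxOf v D, ht, ?_, hDt⟩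
      exact (pv_shr_and_one P _).2 ((hPm _ ht).2 (by rw [hDt]; exact hvSL))
    · rintro ⟨t, ht, hcnd, hDt⟩
      have := (hPm t ht).1 ((pv_shr_and_one P t).1 hcnd)
      rwa [hDt] at this
  by_cases hc : N &&& P = N
  · rw [if_pos (hcond.2 hc), if_pos hc, hout]
  · rw [if_neg (fun h => hc (hcond.1 h)), if_neg hc]
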